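-- pv_equiv track=rewrite | github.com/SuhailParmar/MotorwayTweetConverter | lib/utils.py | extract_contents_of_nested_brackets
-- ===== SOURCE A (Python) =====
-- def extract_contents_of_nested_brackets(s):
--     """
--     string:    J6 (Birmingham) and J7 (Birmingham (N) / Walsall)
--     should be: ["Birmingham", "Birmingham (N) / Walsall"]
--     """
--     contents = []
--     index = 0
--     last_index = len(s)
--
--     while index < last_index:
--         # Scan through the string looking for an open bracket
--         char = s[index]
--         index += 1
--
--         if char == '(':
--             word = ""
--
--             index2 = index  # Prevent scanning from the start
--             while index2 < last_index:
--                 char2 = s[index2]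
--                 index2 += 1
--
--                 if char2 == ')':
--                     # Check if all of the nested brackets are accounted for meaning
--                     # The scanner has found the outmost bracket
--                     if word.count('(') == word.count(')'):
--                         contents.append(word)
--                         index = index2
--                         break
--
--                 word += char2  # The bracket is nested so include it
--                 continue
--
--     return contents
-- ===== SOURCE B (Python) =====
-- def extract_contents_of_nested_brackets(s):
--     # Match parentheses in one stack pass, then select the outermost matched
--     # pairs by scanning the pairs right-to-left (each pair is kept iff it is
--     # not enclosed by a pair already seen), slicing the string once per group.
--     stack = []
--     pairs = []
--     for j, c in enumerate(s):
--         if c == '(':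
--             stack.append(j)
--         elif c == ')' and stack:
--             pairs.append((stack.pop(), j))
--     res = []
--     leftmost = len(s)
--     for i, j in reversed(pairs):
--         if i < leftmost:
--             res.append(s[i + 1:j])
--             leftmost = i
--     res.reverse()
--     return res
-- ===== Notes on version B (the rewrite author's own statement) =====
-- stated objective: alternative
-- what changed: A repeatedly rescans from each open bracket with an inner loop that recounts the accumulated word's parentheses at every step; B instead matches all parentheses in one stack pass over enumerate(s), then selects the outermost matched pairs by a single right-to-left scan over the pair list and slices the string once per group.
import Mathlib
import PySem

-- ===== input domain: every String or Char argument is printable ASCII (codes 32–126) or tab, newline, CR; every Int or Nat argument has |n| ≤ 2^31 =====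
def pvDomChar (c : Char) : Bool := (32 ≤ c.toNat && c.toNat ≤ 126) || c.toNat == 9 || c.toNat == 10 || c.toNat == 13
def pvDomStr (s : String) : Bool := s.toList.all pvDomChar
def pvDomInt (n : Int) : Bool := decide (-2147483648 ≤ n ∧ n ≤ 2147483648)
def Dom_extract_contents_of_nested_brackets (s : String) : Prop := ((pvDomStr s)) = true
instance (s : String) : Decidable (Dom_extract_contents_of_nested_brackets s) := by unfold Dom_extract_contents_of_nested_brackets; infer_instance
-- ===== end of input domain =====

-- B replaces A's rescanning inner loop by a different algorithm: one stack pass matching all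
-- parentheses plus one right-to-left selection of the outermost matched pairs (same return value).

-- ===== PORT A =====
-- A's inner while loop over index2: faithful suffix recursion; `word` accumulates exactly
-- the scanned characters; break returns (word, remaining suffix after the ')').
def aInner : List Char → List Char → Option (List Char × List Char)
  | [], _ => none
  | c :: rest, word =>
    if c = ')' ∧ word.count '(' = word.count ')' then some (word, rest)
    else aInner rest (word ++ [c])

-- termination helper for the outer loop (A's `index = index2` jump strictly advances)
theorem aInner_len : ∀ (l w w' : List Char) (r : List Char),
    aInner l w = some (w', r) → r.length < l.length := by
  intro l
  induction l with
  | nil => intro w w' r h; simp [aInner] at h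
  | cons c rest ih =>
    intro w w' r h
    simp only [aInner] at h
    split at h
    · cases h; simp
    · exact Nat.lt_trans (ih _ _ _ h) (by simp)

-- A's outer while loop over index: suffix recursion; on '(' run the inner scan on the rest.
def aOuter : List Char → List (List Char) → List (List Char)
  | [], contents => contents
  | c :: rest, contents =>
    if c = '(' then
      match h : aInner rest [] with
      | some (w, r) => aOuter r (contents ++ [w])
      | none => aOuter rest contents
    else aOuter rest contents
termination_by l _ => l.length
decreasing_by
  · exact Nat.lt_succ_of_lt (aInner_len _ _ _ _ h)
  · simp
  · simp

def extract_contents_of_nested_brackets (s : String) : List String :=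
  (aOuter s.toList []).map (fun w => String.mk w)

-- ===== PORT B =====
-- first pass: `for j, c in enumerate(s)` matching parentheses onto a stack of open
-- indices (Python appends/pops at the END of its list; here the stack top is the HEAD).
def bStep1 (st : List Int × List (Int × Int)) (jc : Int × Char) : List Int × List (Int × Int) :=
  if jc.2 = '(' then (jc.1 :: st.1, st.2)
  else if jc.2 = ')' then
    match st.1 with
    | i :: t => (t, st.2 ++ [(i, jc.1)])
    | [] => st
  else st

-- second pass: `for i, j in reversed(pairs)` keeping a pair iff i < leftmost; s[i+1:j].
def bStep2 (l : List Char) (st : List (List Char) × Int) (p : Int × Int) : List (List Char) × Int :=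
  if p.1 < st.2 then (st.1 ++ [PySem.List.slice l (some (p.1 + 1)) (some p.2)], p.1) else st

def extract_contents_of_nested_brackets_alt (s : String) : List String :=
  let l := s.toList
  let pairs := ((PySem.List.enumerate l).foldl bStep1 ([], [])).2
  let sel := pairs.reverse.foldl (bStep2 l) ([], (l.length : Int))
  sel.1.reverse.map (fun w => String.mk w)

-- ===== PRECONDITION & SPEC =====
def Spec_extract_contents_of_nested_brackets (s : String) (out : List String) : Prop := out = extract_contents_of_nested_brackets_alt s
instance (s : String) (out : List String) : Decidable (Spec_extract_contents_of_nested_brackets s out) := by unfold Spec_extract_contents_of_nested_brackets; infer_instance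

-- ===== CLAIM (what is proved, stated in full; the proofs are below) =====
def Claim_equal_extract_contents_of_nested_brackets : Prop := ∀ (s : String), Dom_extract_contents_of_nested_brackets s → Spec_extract_contents_of_nested_brackets s (extract_contents_of_nested_brackets s)

-- ===== LEMMAS AND PROOFS =====

-- reference: grab l d = content up to the close that brings relative depth d to -1, plus rest
def grab : List Char → Nat → Option (List Char × List Char)
  | [], _ => none
  | c :: r, d =>
    if c = ')' then
      if d = 0 then some ([], r)
      else (grab r (d - 1)).map (fun p => (c :: p.1, p.2))
    else if c = '(' then (grab r (d + 1)).map (fun p => (c :: p.1, p.2))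
    else (grab r d).map (fun p => (c :: p.1, p.2))

theorem grab_len : ∀ (l : List Char) (d : Nat) (g r : List Char),
    grab l d = some (g, r) → r.length < l.length := by
  intro l
  induction l with
  | nil => intro d g r h; simp [grab] at h
  | cons c rest ih =>
    intro d g r h
    simp only [grab] at h
    split at h
    · split at h
      · cases h; simp
      · rcases Option.map_eq_some_iff.mp h with ⟨⟨g', r'⟩, hg, he⟩
        cases he; exact Nat.lt_trans (ih _ _ _ hg) (by simp)
    · split at h
      · rcases Option.map_eq_some_iff.mp h with ⟨⟨g', r'⟩, hg, he⟩
        cases he; exact Nat.lt_trans (ih _ _ _ hg) (by simp)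
      · rcases Option.map_eq_some_iff.mp h with ⟨⟨g', r'⟩, hg, he⟩
        cases he; exact Nat.lt_trans (ih _ _ _ hg) (by simp)

-- the grabbed content and the remainder reassemble the scanned list
theorem grab_decomp : ∀ (l : List Char) (d : Nat) (g r : List Char),
    grab l d = some (g, r) → l = g ++ ')' :: r := by
  intro l
  induction l with
  | nil => intro d g r h; simp [grab] at h
  | cons c rest ih =>
    intro d g r h
    simp only [grab] at h
    split at h
    · next hc =>
      split at h
      · cases h; simp [hc]
      · rcases Option.map_eq_some_iff.mp h with ⟨⟨g', r'⟩, hg, he⟩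
        cases he; have := ih _ _ _ hg; rw [this]; simp
    · split at h
      · rcases Option.map_eq_some_iff.mp h with ⟨⟨g', r'⟩, hg, he⟩
        cases he; have := ih _ _ _ hg; rw [this]; simp
      · rcases Option.map_eq_some_iff.mp h with ⟨⟨g', r'⟩, hg, he⟩
        cases he; have := ih _ _ _ hg; rw [this]; simp

-- regrab: the grabbed content closes at its own ')' whatever follows
theorem grab_front : ∀ (l : List Char) (d : Nat) (g r : List Char),
    grab l d = some (g, r) → ∀ x, grab (g ++ ')' :: x) d = some (g, x) := by
  intro l
  induction l with
  | nil => intro d g r h; simp [grab] at h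
  | cons c rest ih =>
    intro d g r h x
    simp only [grab] at h
    split at h
    · next hc =>
      split at h
      · next hd => cases h; subst hc; subst hd; simp [grab]
      · next hd =>
        rcases Option.map_eq_some_iff.mp h with ⟨⟨g', r'⟩, hg, he⟩
        cases he
        subst hc
        have := ih _ _ _ hg x
        simp only [List.cons_append, grab, if_neg hd, this]
        rfl
    · next hc =>
      split at h
      · next ho =>
        rcases Option.map_eq_some_iff.mp h with ⟨⟨g', r'⟩, hg, he⟩
        cases he
        subst ho
        have := ih _ _ _ hg x
        simp only [List.cons_append, grab, this]
        rfl
      · next ho =>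
        rcases Option.map_eq_some_iff.mp h with ⟨⟨g', r'⟩, hg, he⟩
        cases he
        have := ih _ _ _ hg x
        simp only [List.cons_append, grab, if_neg hc, if_neg ho, this]
        rfl

-- reference specification: outermost balanced groups, unmatched '(' skipped
def specOuter : List Char → List (List Char)
  | [] => []
  | c :: r =>
    if c = '(' then
      match h : grab r 0 with
      | some (w, rest) => w :: specOuter rest
      | none => specOuter r
    else specOuter r
termination_by l => l.length
decreasing_by
  · exact Nat.lt_succ_of_lt (grab_len _ _ _ _ h)
  · simp
  · simp

theorem specOuter_some {r w rest : List Char} (hg : grab r 0 = some (w, rest)) :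
    specOuter ('(' :: r) = w :: specOuter rest := by
  rw [specOuter]
  simp only [if_true]
  split
  · next w' rest' heq => rw [hg] at heq; cases heq; rfl
  · next heq => rw [hg] at heq; cases heq

theorem specOuter_none {r : List Char} (hg : grab r 0 = none) :
    specOuter ('(' :: r) = specOuter r := by
  rw [specOuter]
  simp only [if_true]
  split
  · next w' rest' heq => rw [hg] at heq; cases heq
  · rfl

theorem specOuter_other {c : Char} (hc : ¬ c = '(') (r : List Char) :
    specOuter (c :: r) = specOuter r := by
  rw [specOuter, if_neg hc]

-- grab at depth d+1 = grab to the first close, then grab the remainder at depth d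
theorem grab_succ : ∀ (n : Nat) (l : List Char) (d : Nat), l.length ≤ n →
    grab l (d + 1) = (grab l 0).bind
      (fun p => (grab p.2 d).map (fun q => (p.1 ++ ')' :: q.1, q.2))) := by
  intro n
  induction n with
  | zero =>
    intro l d hl
    have : l = [] := List.length_eq_zero_iff.mp (Nat.le_zero.mp hl)
    subst this; simp [grab]
  | succ n ih =>
    intro l d hl
    match l with
    | [] => simp [grab]
    | c :: r =>
      have hr : r.length ≤ n := Nat.le_of_succ_le_succ hl
      by_cases hc : c = ')'
      · subst hc
        rw [show grab (')' :: r) (d + 1) = (grab r d).map (fun p => (')' :: p.1, p.2)) from by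
              simp [grab],
            show grab (')' :: r) 0 = some ([], r) from by simp [grab]]
        cases hg : grab r d <;> simp [hg]
      · by_cases ho : c = '('
        · subst ho
          rw [show grab ('(' :: r) (d + 1) = (grab r (d + 1 + 1)).map (fun p => ('(' :: p.1, p.2)) from by
                simp [grab],
              show grab ('(' :: r) 0 = (grab r 1).map (fun p => ('(' :: p.1, p.2)) from by
                simp [grab]]
          have h1 := ih r 0 hr
          rw [Nat.zero_add] at h1
          rw [ih r (d + 1) hr, h1]
          cases hg : grab r 0 with
          | none => simp
          | some p =>
            rcases p with ⟨a, ra⟩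
            have hra : ra.length ≤ n := Nat.le_of_lt (Nat.lt_of_lt_of_le (grab_len r 0 a ra hg) hr)
            simp only [Option.bind_some]
            rw [ih ra d hra]
            cases hg2 : grab ra 0 with
            | none => simp
            | some q =>
              rcases q with ⟨b, rb⟩
              cases hg3 : grab rb d with
              | none => simp [hg3]
              | some u => simp [hg3]
        · rw [show grab (c :: r) (d + 1) = (grab r (d + 1)).map (fun p => (c :: p.1, p.2)) from by
                simp [grab, hc, ho],
              show grab (c :: r) 0 = (grab r 0).map (fun p => (c :: p.1, p.2)) from by
                simp [grab, hc, ho]]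
          rw [ih r d hr]
          cases hg : grab r 0 with
          | none => simp
          | some p =>
            rcases p with ⟨a, ra⟩
            cases hg2 : grab ra d with
            | none => simp [hg2]
            | some q => simp [hg2]

-- A's count-based inner scan computes grab at the word's surplus of open brackets
theorem aInner_grab : ∀ (l w : List Char), w.count ')' ≤ w.count '(' →
    aInner l w = (grab l (w.count '(' - w.count ')')).map (fun p => (w ++ p.1, p.2)) := by
  intro l
  induction l with
  | nil => intro w hw; simp [aInner, grab]
  | cons c r ih =>
    intro w hw
    by_cases hc : c = ')'
    · subst hc
      by_cases he : w.count '(' = w.count ')'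
      · rw [show aInner (')' :: r) w = some (w, r) from by simp [aInner, he],
            show w.count '(' - w.count ')' = 0 from by omega]
        simp [grab]
      · rw [show aInner (')' :: r) w = aInner r (w ++ [')']) from by simp [aInner, he]]
        rw [ih (w ++ [')']) (by simp [List.count_append]; omega)]
        rw [show grab (')' :: r) (w.count '(' - w.count ')')
              = (grab r (w.count '(' - w.count ')' - 1)).map (fun p => (')' :: p.1, p.2)) from by
              rw [grab]; rw [if_pos rfl, if_neg (by omega)]]
        have harg : (w ++ [')']).count '(' - (w ++ [')']).count ')'
            = w.count '(' - w.count ')' - 1 := by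
          simp [List.count_append]; omega
        rw [harg]
        cases grab r (w.count '(' - w.count ')' - 1) <;> simp
    · by_cases ho : c = '('
      · subst ho
        rw [show aInner ('(' :: r) w = aInner r (w ++ ['(']) from by simp [aInner]]
        rw [ih (w ++ ['(']) (by simp [List.count_append]; omega)]
        have harg : (w ++ ['(']).count '(' - (w ++ ['(']).count ')'
            = (w.count '(' - w.count ')') + 1 := by
          simp [List.count_append]; omega
        rw [harg, show grab ('(' :: r) (w.count '(' - w.count ')')
              = (grab r ((w.count '(' - w.count ')') + 1)).map (fun p => ('(' :: p.1, p.2)) from by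
              simp [grab]]
        cases grab r ((w.count '(' - w.count ')') + 1) <;> simp
      · rw [show aInner (c :: r) w = aInner r (w ++ [c]) from by simp [aInner, hc]]
        rw [ih (w ++ [c]) (by simp [List.count_append, hc, ho]; omega)]
        have harg : (w ++ [c]).count '(' - (w ++ [c]).count ')'
            = w.count '(' - w.count ')' := by
          simp [List.count_append, hc, ho]
        rw [harg, show grab (c :: r) (w.count '(' - w.count ')')
              = (grab r (w.count '(' - w.count ')')).map (fun p => (c :: p.1, p.2)) from by
              simp [grab, hc, ho]]
        cases grab r (w.count '(' - w.count ')') <;> simp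

-- A's outer loop appends exactly the reference groups
theorem aOuter_spec : ∀ (n : Nat) (l : List Char), l.length ≤ n →
    ∀ acc, aOuter l acc = acc ++ specOuter l := by
  intro n
  induction n with
  | zero =>
    intro l hl acc
    have : l = [] := List.length_eq_zero_iff.mp (Nat.le_zero.mp hl)
    subst this; simp [aOuter, specOuter]
  | succ n ih =>
    intro l hl acc
    match l with
    | [] => simp [aOuter, specOuter]
    | c :: r =>
      have hr : r.length ≤ n := Nat.le_of_succ_le_succ hl
      by_cases hc : c = '('
      · subst hc
        have hi := aInner_grab r [] (by simp)
        simp only [List.count_nil, Nat.sub_zero, List.nil_append] at hi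
        rw [aOuter, specOuter]
        cases hg : grab r 0 with
        | none =>
          have hi2 : aInner r [] = none := by rw [hi, hg]; rfl
          simp only [if_true]
          split
          · next w' rest' heq => rw [hi2] at heq; cases heq
          · exact ih r hr acc
        | some p =>
          rcases p with ⟨w, rest⟩
          have hi2 : aInner r [] = some (w, rest) := by rw [hi, hg]; rfl
          have hrest : rest.length ≤ n :=
            Nat.le_of_lt (Nat.lt_of_lt_of_le (grab_len r 0 w rest hg) hr)
          simp only [if_true]
          split
          · next w' rest' heq =>
            rw [hi2] at heq
            cases heq
            rw [ih rest hrest (acc ++ [w])]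
            simp
          · next heq => rw [hi2] at heq; cases heq
      · rw [aOuter, specOuter]
        simp only [if_neg hc]
        exact ih r hr acc

-- all matched pairs of l (offsets starting at j), in close-index order
def pairsAll : List Char → Nat → List (Nat × Nat)
  | [], _ => []
  | c :: r, j =>
    if c = '(' then
      match h : grab r 0 with
      | some (w, rest) => pairsAll w (j+1) ++ (j, j+1+w.length) :: pairsAll rest (j+2+w.length)
      | none => pairsAll r (j+1)
    else pairsAll r (j+1)
termination_by l _ => l.length
decreasing_by
  · have h2 := grab_decomp r 0 w rest h; subst h2; simp
  · exact Nat.lt_succ_of_lt (grab_len _ _ _ _ h)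
  · simp
  · simp

theorem pairsAll_some {r w rest : List Char} (hg : grab r 0 = some (w, rest)) (j : Nat) :
    pairsAll ('(' :: r) j
      = pairsAll w (j+1) ++ (j, j+1+w.length) :: pairsAll rest (j+2+w.length) := by
  rw [pairsAll]
  simp only [if_true]
  split
  · next w' rest' heq => rw [hg] at heq; cases heq; rfl
  · next heq => rw [hg] at heq; cases heq

theorem pairsAll_none {r : List Char} (hg : grab r 0 = none) (j : Nat) :
    pairsAll ('(' :: r) j = pairsAll r (j+1) := by
  rw [pairsAll]
  simp only [if_true]
  split
  · next w' rest' heq => rw [hg] at heq; cases heq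
  · rfl

theorem pairsAll_other {c : Char} (hc : ¬ c = '(') (r : List Char) (j : Nat) :
    pairsAll (c :: r) j = pairsAll r (j+1) := by
  rw [pairsAll, if_neg hc]

-- Nat-level mirror of B's first pass (final stack and the matched pairs)
def npass : List Char → Nat → List Nat → List (Nat × Nat) → List Nat × List (Nat × Nat)
  | [], _, st, ps => (st, ps)
  | c :: r, j, st, ps =>
    if c = '(' then npass r (j+1) (j :: st) ps
    else if c = ')' then
      match st with
      | i :: t => npass r (j+1) t (ps ++ [(i, j)])
      | [] => npass r (j+1) [] ps
    else npass r (j+1) st ps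

-- cast bridge: the Int fold of bStep1 over enumerate computes npass
theorem pass_cast : ∀ (l : List Char) (j : Nat) (st : List Nat) (ps : List (Nat × Nat)),
    (PySem.List.enumerate l (j : Int)).foldl bStep1
      (st.map (fun i => (i : Int)), ps.map (fun p => ((p.1 : Int), (p.2 : Int))))
    = ((npass l j st ps).1.map (fun i => (i : Int)),
       (npass l j st ps).2.map (fun p => ((p.1 : Int), (p.2 : Int)))) := by
  intro l
  induction l with
  | nil => intro j st ps; simp [npass, PySem.List.enumerate_nil]
  | cons c r ih =>
    intro j st ps
    rw [PySem.List.enumerate_cons, List.foldl_cons,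
        show ((j : Int) + 1) = ((j + 1 : Nat) : Int) from by push_cast; ring]
    by_cases hc : c = '('
    · subst hc
      rw [show bStep1 (st.map (fun i => (i : Int)), ps.map (fun p => ((p.1 : Int), (p.2 : Int))))
            ((j : Int), '(') = ((j :: st).map (fun i => (i : Int)),
              ps.map (fun p => ((p.1 : Int), (p.2 : Int)))) from by simp [bStep1]]
      rw [ih (j+1) (j :: st) ps]
      simp [npass]
    · by_cases ho : c = ')'
      · subst ho
        match st with
        | [] =>
          rw [show bStep1 (([] : List Nat).map (fun i => (i : Int)),
                ps.map (fun p => ((p.1 : Int), (p.2 : Int)))) ((j : Int), ')')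
              = (([] : List Nat).map (fun i => (i : Int)),
                 ps.map (fun p => ((p.1 : Int), (p.2 : Int)))) from by simp [bStep1]]
          rw [ih (j+1) [] ps]
          simp [npass]
        | i :: t =>
          rw [show bStep1 ((i :: t).map (fun i => (i : Int)),
                ps.map (fun p => ((p.1 : Int), (p.2 : Int)))) ((j : Int), ')')
              = (t.map (fun i => (i : Int)),
                 (ps ++ [(i, j)]).map (fun p => ((p.1 : Int), (p.2 : Int)))) from by
                simp [bStep1]]
          rw [ih (j+1) t (ps ++ [(i, j)])]
          simp [npass]
      · rw [show bStep1 (st.map (fun i => (i : Int)),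
              ps.map (fun p => ((p.1 : Int), (p.2 : Int)))) ((j : Int), c)
            = (st.map (fun i => (i : Int)),
               ps.map (fun p => ((p.1 : Int), (p.2 : Int)))) from by simp [bStep1, hc, ho]]
        rw [ih (j+1) st ps]
        simp [npass, hc, ho]

-- Nat-level mirror of B's second pass
def nstep (S : List Char) (st : List (List Char) × Nat) (p : Nat × Nat) : List (List Char) × Nat :=
  if p.1 < st.2 then (st.1 ++ [(S.drop (p.1+1)).take (p.2 - (p.1+1))], p.1) else st

-- cast bridge for the selection fold
theorem sel_cast (S : List Char) : ∀ (P : List (Nat × Nat)) (res : List (List Char)) (lm : Nat),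
    (P.map (fun p => ((p.1 : Int), (p.2 : Int)))).foldl (bStep2 S) (res, (lm : Int))
    = ((P.foldl (nstep S) (res, lm)).1, ((P.foldl (nstep S) (res, lm)).2 : Int)) := by
  intro P
  induction P with
  | nil => intro res lm; simp
  | cons p t ih =>
    rcases p with ⟨i, j⟩
    intro res lm
    rw [List.map_cons, List.foldl_cons, List.foldl_cons]
    by_cases hij : i < lm
    · have hcond : ((i : Int)) < ((lm : Int)) := by exact_mod_cast hij
      rw [show bStep2 S (res, (lm : Int)) ((i : Int), (j : Int))
          = (res ++ [(S.drop (i+1)).take (j - (i+1))], (i : Int)) from by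
          simp only [bStep2, if_pos hcond]
          rw [show ((i : Int) + 1) = ((i + 1 : Nat) : Int) from by push_cast; ring,
              PySem.List.slice_natCast]]
      rw [show nstep S (res, lm) (i, j)
          = (res ++ [(S.drop (i+1)).take (j - (i+1))], i) from by
          simp only [nstep, if_pos hij]]
      exact ih (res ++ [(S.drop (i+1)).take (j - (i+1))]) i
    · have hcond : ¬ ((i : Int)) < ((lm : Int)) := by exact_mod_cast hij
      rw [show bStep2 S (res, (lm : Int)) ((i : Int), (j : Int)) = (res, (lm : Int)) from by
          simp only [bStep2, if_neg hcond],
        show nstep S (res, lm) (i, j) = (res, lm) from by simp only [nstep, if_neg hij]]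
      exact ih res lm

-- every matched pair opens at or after the region's offset
theorem mem_pairsAll_ge : ∀ (n : Nat) (l : List Char), l.length ≤ n →
    ∀ (j : Nat) (p : Nat × Nat), p ∈ pairsAll l j → j ≤ p.1 := by
  intro n
  induction n with
  | zero =>
    intro l hl j p hp
    have : l = [] := List.length_eq_zero_iff.mp (Nat.le_zero.mp hl)
    subst this; simp [pairsAll] at hp
  | succ n ih =>
    intro l hl j p hp
    match l with
    | [] => simp [pairsAll] at hp
    | c :: r =>
      have hr : r.length ≤ n := Nat.le_of_succ_le_succ hl
      by_cases hc : c = '('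
      · subst hc
        rcases hg : grab r 0 with _ | ⟨w, rest⟩
        · rw [pairsAll_none hg] at hp
          exact Nat.le_of_succ_le (ih r hr (j+1) p hp)
        · rw [pairsAll_some hg] at hp
          have hd := grab_decomp r 0 w rest hg
          have hw : w.length ≤ n := by
            have : r.length = w.length + 1 + rest.length := by rw [hd]; simp; omega
            omega
          have hrest : rest.length ≤ n := by
            have : r.length = w.length + 1 + rest.length := by rw [hd]; simp; omega
            omega
          rcases List.mem_append.mp hp with h1 | h1
          · exact Nat.le_of_succ_le (ih w hw (j+1) p h1)
          · rcases List.mem_cons.mp h1 with h2 | h2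
            · subst h2; simp
            · have := ih rest hrest (j+2+w.length) p h2
              omega
      · rw [pairsAll_other hc] at hp
        exact Nat.le_of_succ_le (ih r hr (j+1) p hp)

-- pairs opening at or beyond the current bound are all skipped
theorem nsel_skip (S : List Char) : ∀ (P : List (Nat × Nat)) (res : List (List Char)) (lm : Nat),
    (∀ p ∈ P, lm ≤ p.1) → P.foldl (nstep S) (res, lm) = (res, lm) := by
  intro P
  induction P with
  | nil => intro res lm _; simp
  | cons p t ih =>
    intro res lm h
    rw [List.foldl_cons,
        show nstep S (res, lm) p = (res, lm) from by
          rw [nstep, if_neg (Nat.not_lt.mpr (h p (by simp)))]]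
    exact ih res lm (fun q hq => h q (by simp [hq]))

-- the bound left behind by the selection scan
def hlm : List Char → Nat → Nat → Nat
  | [], _, lm => lm
  | c :: r, j, lm =>
    if c = '(' then
      match h : grab r 0 with
      | some _ => j
      | none => hlm r (j+1) lm
    else hlm r (j+1) lm
termination_by l _ _ => l.length
decreasing_by
  · simp
  · simp

theorem hlm_some {r : List Char} {w rest : List Char} (hg : grab r 0 = some (w, rest)) (j lm : Nat) :
    hlm ('(' :: r) j lm = j := by
  rw [hlm]
  simp only [if_true]
  split
  · rfl
  · next heq => rw [hg] at heq; cases heq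

theorem hlm_none {r : List Char} (hg : grab r 0 = none) (j lm : Nat) :
    hlm ('(' :: r) j lm = hlm r (j+1) lm := by
  rw [hlm]
  simp only [if_true]
  split
  · next w' heq => rw [hg] at heq; cases heq
  · rfl

theorem hlm_other {c : Char} (hc : ¬ c = '(') (r : List Char) (j lm : Nat) :
    hlm (c :: r) j lm = hlm r (j+1) lm := by
  rw [hlm, if_neg hc]

theorem hlm_cases : ∀ (n : Nat) (l : List Char), l.length ≤ n →
    ∀ (j lm : Nat), hlm l j lm = lm ∨ j ≤ hlm l j lm := by
  intro n
  induction n with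
  | zero =>
    intro l hl j lm
    have : l = [] := List.length_eq_zero_iff.mp (Nat.le_zero.mp hl)
    subst this; simp [hlm]
  | succ n ih =>
    intro l hl j lm
    match l with
    | [] => simp [hlm]
    | c :: r =>
      have hr : r.length ≤ n := Nat.le_of_succ_le_succ hl
      by_cases hc : c = '('
      · subst hc
        rcases hg : grab r 0 with _ | ⟨w, rest⟩
        · rw [hlm_none hg]
          rcases ih r hr (j+1) lm with h | h
          · exact Or.inl h
          · exact Or.inr (by omega)
        · rw [hlm_some hg]
          exact Or.inr le_rfl
      · rw [hlm_other hc]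
        rcases ih r hr (j+1) lm with h | h
        · exact Or.inl h
        · exact Or.inr (by omega)

-- the reversed selection scan keeps exactly the outermost groups (in reverse)
theorem sel_main : ∀ (n : Nat) (l : List Char), l.length ≤ n →
    ∀ (S : List Char) (j lm : Nat) (res : List (List Char)),
    S.drop j = l → j + l.length ≤ lm →
    (pairsAll l j).reverse.foldl (nstep S) (res, lm)
      = (res ++ (specOuter l).reverse, hlm l j lm) := by
  intro n
  induction n with
  | zero =>
    intro l hl S j lm res hdrop hlm0
    have : l = [] := List.length_eq_zero_iff.mp (Nat.le_zero.mp hl)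
    subst this; simp [pairsAll, specOuter, hlm]
  | succ n ih =>
    intro l hl S j lm res hdrop hlm0
    match l, hl, hdrop, hlm0 with
    | [], _, _, _ => simp [pairsAll, specOuter, hlm]
    | c :: r, hl, hdrop, hlm0 =>
      have hr : r.length ≤ n := Nat.le_of_succ_le_succ hl
      have hdrop1 : S.drop (j+1) = r := by
        rw [← List.tail_drop, hdrop]; rfl
      by_cases hc : c = '('
      · subst hc
        cases hg : grab r 0 with
        | none =>
          rw [pairsAll_none hg, specOuter_none hg, hlm_none hg]
          exact ih r hr S (j+1) lm res hdrop1 (by simp at hlm0; omega)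
        | some p =>
          rcases p with ⟨w, rest⟩
          have hd := grab_decomp r 0 w rest hg
          have hlen : r.length = w.length + 1 + rest.length := by rw [hd]; simp; omega
          have hw : w.length ≤ n := by omega
          have hrest : rest.length ≤ n := by omega
          have hdrop2 : S.drop (j+2+w.length) = rest := by
            have : j+2+w.length = (j+1) + (w.length + 1) := by omega
            rw [this, ← List.drop_drop, hdrop1, hd,
                show w ++ ')' :: rest = (w ++ [')']) ++ rest from by simp]
            exact List.drop_left' (by simp)
          rw [pairsAll_some hg, specOuter_some hg, hlm_some hg]
          rw [List.reverse_append, List.reverse_cons, List.foldl_append, List.foldl_append]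
          have step1 : (pairsAll rest (j+2+w.length)).reverse.foldl (nstep S) (res, lm)
              = (res ++ (specOuter rest).reverse, hlm rest (j+2+w.length) lm) :=
            ih rest hrest S (j+2+w.length) lm res hdrop2 (by simp at hlm0; omega)
          rw [step1]
          have hj : j < hlm rest (j+2+w.length) lm := by
            rcases hlm_cases n rest hrest (j+2+w.length) lm with h | h
            · simp at hlm0; omega
            · omega
          have step2 : List.foldl (nstep S) (res ++ (specOuter rest).reverse,
                hlm rest (j+2+w.length) lm) [(j, j+1+w.length)]
              = (res ++ (specOuter rest).reverse ++ [w], j) := by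
            rw [List.foldl_cons, List.foldl_nil]
            rw [show nstep S (res ++ (specOuter rest).reverse, hlm rest (j+2+w.length) lm)
                  (j, j+1+w.length)
                = (res ++ (specOuter rest).reverse
                    ++ [(S.drop (j+1)).take (j+1+w.length - (j+1))], j) from by
                simp only [nstep, if_pos hj]]
            rw [hdrop1, hd, show j+1+w.length - (j+1) = w.length from by omega]
            rw [show (w ++ ')' :: rest).take w.length = w from by
                  rw [List.take_left' rfl]]
          rw [step2]
          rw [nsel_skip S (pairsAll w (j+1)).reverse (res ++ (specOuter rest).reverse ++ [w]) j
                (by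
                  intro p hp
                  rw [List.mem_reverse] at hp
                  have := mem_pairsAll_ge n w hw (j+1) p hp
                  omega)]
          simp [List.append_assoc]
      · rw [pairsAll_other hc, specOuter_other hc, hlm_other hc]
        exact ih r hr S (j+1) lm res hdrop1 (by simp at hlm0; omega)

-- B's first pass from the empty stack emits all matched pairs
theorem pass_closed : ∀ (n : Nat) (l : List Char), l.length ≤ n →
    ∀ (cont rest : List Char), grab l 0 = some (cont, rest) →
    ∀ (j i : Nat) (st : List Nat) (ps : List (Nat × Nat)),
    npass l j (i :: st) ps
      = npass rest (j + cont.length + 1) st (ps ++ pairsAll cont j ++ [(i, j + cont.length)]) := by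
  intro n
  induction n with
  | zero =>
    intro l hl cont rest hg
    have : l = [] := List.length_eq_zero_iff.mp (Nat.le_zero.mp hl)
    subst this; simp [grab] at hg
  | succ n ih =>
    intro l hl cont rest hg
    match l with
    | [] => simp [grab] at hg
    | c :: r =>
      have hr : r.length ≤ n := Nat.le_of_succ_le_succ hl
      intro j i st ps
      by_cases hc : c = ')'
      · subst hc
        rw [show grab (')' :: r) 0 = some ([], r) from by simp [grab]] at hg
        rw [Option.some_inj, Prod.mk.injEq] at hg
        obtain ⟨h1, h2⟩ := hg
        subst h1; subst h2
        rw [show npass (')' :: r) j (i :: st) ps = npass r (j+1) st (ps ++ [(i, j)]) from by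
              simp [npass]]
        simp [pairsAll]
      · by_cases ho : c = '('
        · subst ho
          rw [show grab ('(' :: r) 0 = (grab r (0 + 1)).map (fun p => ('(' :: p.1, p.2)) from by
                simp [grab]] at hg
          rcases Option.map_eq_some_iff.mp hg with ⟨⟨g1, rest'⟩, hg1, he⟩
          cases he
          rw [grab_succ n r 0 hr] at hg1
          cases ha : grab r 0 with
          | none => rw [ha] at hg1; simp at hg1
          | some p =>
            rcases p with ⟨a, ra⟩
            rw [ha] at hg1
            simp only [Option.bind_some] at hg1
            rcases Option.map_eq_some_iff.mp hg1 with ⟨⟨b, rb⟩, hb, he2⟩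
            cases he2
            have hra : ra.length ≤ n :=
              Nat.le_of_lt (Nat.lt_of_lt_of_le (grab_len r 0 a ra ha) hr)
            rw [show npass ('(' :: r) j (i :: st) ps = npass r (j+1) (j :: i :: st) ps from by
                  simp [npass]]
            rw [ih r hr a ra ha (j+1) j (i :: st) ps]
            rw [ih ra hra b rb hb (j+1+a.length+1) i st
                  (ps ++ pairsAll a (j+1) ++ [(j, j+1+a.length)])]
            rw [pairsAll_some (grab_front r 0 a ra ha b)]
            have e1 : j+1+a.length+1 + b.length + 1
                = j + ('(' :: (a ++ ')' :: b)).length + 1 := by simp; omega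
            have e2 : j+1+a.length+1 + b.length = j + ('(' :: (a ++ ')' :: b)).length := by
              simp; omega
            have e3 : j+1+a.length+1 = j+2+a.length := by omega
            rw [e1, e2, e3]
            simp [List.append_assoc]
        · rw [show grab (c :: r) 0 = (grab r 0).map (fun p => (c :: p.1, p.2)) from by
                simp [grab, hc, ho]] at hg
          rcases Option.map_eq_some_iff.mp hg with ⟨⟨a, ra⟩, ha, he⟩
          cases he
          rw [show npass (c :: r) j (i :: st) ps = npass r (j+1) (i :: st) ps from by
                simp [npass, hc, ho]]
          rw [ih r hr a ra ha (j+1) i st ps]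
          rw [pairsAll_other ho]
          have e1 : j+1 + a.length + 1 = j + (c :: a).length + 1 := by simp; omega
          have e2 : j+1 + a.length = j + (c :: a).length := by simp; omega
          rw [e1, e2]

theorem pass_open : ∀ (n : Nat) (l : List Char), l.length ≤ n →
    grab l 0 = none →
    ∀ (j : Nat) (st : List Nat) (ps : List (Nat × Nat)),
    (npass l j st ps).2 = ps ++ pairsAll l j := by
  intro n
  induction n with
  | zero =>
    intro l hl hg j st ps
    have : l = [] := List.length_eq_zero_iff.mp (Nat.le_zero.mp hl)
    subst this; simp [npass, pairsAll]
  | succ n ih =>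
    intro l hl hg j st ps
    match l with
    | [] => simp [npass, pairsAll]
    | c :: r =>
      have hr : r.length ≤ n := Nat.le_of_succ_le_succ hl
      by_cases hc : c = ')'
      · subst hc
        rw [show grab (')' :: r) 0 = some ([], r) from by simp [grab]] at hg
        cases hg
      · by_cases ho : c = '('
        · subst ho
          rw [show grab ('(' :: r) 0 = (grab r (0 + 1)).map (fun p => ('(' :: p.1, p.2)) from by
                simp [grab]] at hg
          have hg1 : grab r (0 + 1) = none := Option.map_eq_none_iff.mp hg
          rw [grab_succ n r 0 hr] at hg1
          rw [show npass ('(' :: r) j st ps = npass r (j+1) (j :: st) ps from by simp [npass]]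
          cases ha : grab r 0 with
          | none =>
            rw [ih r hr ha (j+1) (j :: st) ps, pairsAll_none ha]
          | some p =>
            rcases p with ⟨a, ra⟩
            rw [ha] at hg1
            simp only [Option.bind_some] at hg1
            have hb : grab ra 0 = none := Option.map_eq_none_iff.mp hg1
            have hra : ra.length ≤ n :=
              Nat.le_of_lt (Nat.lt_of_lt_of_le (grab_len r 0 a ra ha) hr)
            rw [pass_closed n r hr a ra ha (j+1) j st ps]
            rw [ih ra hra hb (j+1+a.length+1) st
                  (ps ++ pairsAll a (j+1) ++ [(j, j+1+a.length)])]
            rw [pairsAll_some ha]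
            have e3 : j+1+a.length+1 = j+2+a.length := by omega
            rw [e3]
            simp [List.append_assoc]
        · rw [show grab (c :: r) 0 = (grab r 0).map (fun p => (c :: p.1, p.2)) from by
                simp [grab, hc, ho]] at hg
          have hg1 : grab r 0 = none := Option.map_eq_none_iff.mp hg
          rw [show npass (c :: r) j st ps = npass r (j+1) st ps from by simp [npass, hc, ho]]
          rw [ih r hr hg1 (j+1) st ps, pairsAll_other ho]

theorem pass_empty : ∀ (n : Nat) (l : List Char), l.length ≤ n →
    ∀ (j : Nat) (ps : List (Nat × Nat)),
    (npass l j [] ps).2 = ps ++ pairsAll l j := by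
  intro n
  induction n with
  | zero =>
    intro l hl j ps
    have : l = [] := List.length_eq_zero_iff.mp (Nat.le_zero.mp hl)
    subst this; simp [npass, pairsAll]
  | succ n ih =>
    intro l hl j ps
    match l with
    | [] => simp [npass, pairsAll]
    | c :: r =>
      have hr : r.length ≤ n := Nat.le_of_succ_le_succ hl
      by_cases ho : c = '('
      · subst ho
        rw [show npass ('(' :: r) j [] ps = npass r (j+1) [j] ps from by simp [npass]]
        cases ha : grab r 0 with
        | none =>
          rw [pass_open n r hr ha (j+1) [j] ps, pairsAll_none ha]
        | some p =>
          rcases p with ⟨a, ra⟩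
          have hra : ra.length ≤ n :=
            Nat.le_of_lt (Nat.lt_of_lt_of_le (grab_len r 0 a ra ha) hr)
          rw [pass_closed n r hr a ra ha (j+1) j [] ps]
          rw [ih ra hra (j+1+a.length+1) (ps ++ pairsAll a (j+1) ++ [(j, j+1+a.length)])]
          rw [pairsAll_some ha]
          have e3 : j+1+a.length+1 = j+2+a.length := by omega
          rw [e3]
          simp [List.append_assoc]
      · rw [show npass (c :: r) j [] ps = npass r (j+1) [] ps from by
              by_cases hc : c = ')' <;> simp [npass, hc, ho]]
        rw [ih r hr (j+1) ps, pairsAll_other ho]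

-- ===== VERDICT (by name: the statement is the Claim_ definition above) =====
theorem extract_contents_of_nested_brackets_spec : Claim_equal_extract_contents_of_nested_brackets := by
  intro s _
  unfold Spec_extract_contents_of_nested_brackets
  unfold extract_contents_of_nested_brackets extract_contents_of_nested_brackets_alt
  have h1 : (PySem.List.enumerate s.toList).foldl bStep1 ([], [])
      = ((npass s.toList 0 [] []).1.map (fun i => (i : Int)),
         (npass s.toList 0 [] []).2.map (fun p => ((p.1 : Int), (p.2 : Int)))) := by
    have := pass_cast s.toList 0 [] []
    simpa using this
  have h2 : (npass s.toList 0 [] []).2 = pairsAll s.toList 0 := by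
    simpa using pass_empty s.toList.length s.toList le_rfl 0 []
  have h3 : (pairsAll s.toList 0).reverse.foldl (nstep s.toList) ([], s.toList.length)
      = ([] ++ (specOuter s.toList).reverse, hlm s.toList 0 s.toList.length) :=
    sel_main s.toList.length s.toList le_rfl s.toList 0 s.toList.length [] (by simp) (by simp)
  simp only [h1, h2]
  rw [← List.map_reverse]
  rw [sel_cast s.toList (pairsAll s.toList 0).reverse [] s.toList.length]
  rw [h3]
  rw [aOuter_spec s.toList.length s.toList le_rfl []]
  simp
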